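-- pv_equiv track=rewrite | github.com/jJup0/LeetCode | Hard/1931. Painting a Grid With Three Different Colors.py | get_column_colorings
-- ===== SOURCE A (Python) =====
-- def get_column_colorings(m: int):
--     colorings = ["a", "b", "c"]
--     for _ in range(m - 1):
--         new_colorings: list[str] = []
--         for color in colorings:
--             for new_c in "abc":
--                 if new_c != color[-1]:
--                     new_colorings.append(color + new_c)
--         colorings = new_colorings
--     return colorings
-- ===== SOURCE B (Python) =====
-- def get_column_colorings(m: int):
--     def extend(current: str) -> list[str]:
--         if len(current) >= m:
--             return [current]
--         results: list[str] = []
--         for c in "abc":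
--             if c != current[-1]:
--                 results.extend(extend(current + c))
--         return results
--     return extend("a") + extend("b") + extend("c")
-- ===== Notes on version B (the rewrite author's own statement) =====
-- stated objective: alternative
-- what changed: Replaced the level-by-level BFS rebuild of the whole coloring list with a depth-first recursive backtracking generator seeded on the three single-letter prefixes; trying 'abc' in order depth-first yields the same lexicographic list.
import Mathlib
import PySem

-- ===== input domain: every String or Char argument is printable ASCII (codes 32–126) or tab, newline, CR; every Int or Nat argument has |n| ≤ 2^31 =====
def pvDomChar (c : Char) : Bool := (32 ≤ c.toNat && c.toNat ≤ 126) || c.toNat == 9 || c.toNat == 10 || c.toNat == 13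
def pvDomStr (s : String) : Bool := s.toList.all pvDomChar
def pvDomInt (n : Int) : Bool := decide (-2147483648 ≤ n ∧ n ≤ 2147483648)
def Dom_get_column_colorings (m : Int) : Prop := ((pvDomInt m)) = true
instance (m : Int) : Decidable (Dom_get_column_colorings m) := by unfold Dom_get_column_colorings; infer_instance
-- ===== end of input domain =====

-- B replaces the level-by-level rebuild of the coloring list with a depth-first
-- recursive backtracking generator (same cost; 'abc' order preserves the list order).

-- ===== PORT A =====
-- Python str is represented as List Char inside the loop; String.ofList at the end.
def get_column_colorings (m : Int) : List String :=
  let colorings : List (List Char) := [['a'], ['b'], ['c']]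
  let colorings := (PySem.List.pyRange 0 (m - 1) 1).foldl
    (fun colorings _ =>
      colorings.foldl
        (fun new_colorings color =>
          ['a', 'b', 'c'].foldl
            (fun acc new_c =>
              if some new_c ≠ PySem.List.pyGet? color (-1) then acc ++ [color ++ [new_c]]
              else acc)
            new_colorings)
        [])
    colorings
  colorings.map String.ofList

-- ===== PORT B =====
-- helper `extend` of Source B: depth-first extension of the current prefix
def pvExtend (m : Int) (current : List Char) : List (List Char) :=
  if _h : m ≤ (current.length : Int) then [current]
  else
    ['a', 'b', 'c'].foldl
      (fun results c =>
        if some c ≠ PySem.List.pyGet? current (-1) then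
          results ++ pvExtend m (current ++ [c])
        else results)
      []
termination_by (m - current.length).toNat
decreasing_by
  simp only [List.length_append, List.length_cons, List.length_nil]
  omega

def get_column_colorings_alt (m : Int) : List String :=
  (pvExtend m ['a'] ++ pvExtend m ['b'] ++ pvExtend m ['c']).map String.ofList

-- ===== PRECONDITION & SPEC =====
def Spec_get_column_colorings (m : Int) (out : List String) : Prop := out = get_column_colorings_alt m
instance (m : Int) (out : List String) : Decidable (Spec_get_column_colorings m out) := by unfold Spec_get_column_colorings; infer_instance

-- ===== CLAIM (what is proved, stated in full; the proofs are below) =====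
def Claim_equal_get_column_colorings : Prop := ∀ (m : Int), Dom_get_column_colorings m → Spec_get_column_colorings m (get_column_colorings m)

-- ===== LEMMAS AND PROOFS =====

-- one BFS level of A, as a flatMap
def pvStep (l : List (List Char)) : List (List Char) :=
  l.flatMap (fun color =>
    (['a', 'b', 'c'].filter (fun c => some c ≠ PySem.List.pyGet? color (-1))).map
      (fun c => color ++ [c]))

theorem pvStep_iter_flat (n : Nat) (l : List (List Char)) :
    pvStep^[n] l = l.flatMap (fun x => pvStep^[n] [x]) := by
  induction n generalizing l with
  | zero => simp
  | succ n ih =>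
    rw [Function.iterate_succ_apply, ih (pvStep l)]
    have hx : ∀ x, pvStep^[n + 1] [x] = (pvStep [x]).flatMap (fun y => pvStep^[n] [y]) := by
      intro x; rw [Function.iterate_succ_apply, ih]
    simp only [hx]
    simp [pvStep, List.flatMap_assoc]

-- A's inner double loop over one level computes pvStep
theorem pvInner_eq_step (colorings : List (List Char)) :
    colorings.foldl
      (fun new_colorings color =>
        ['a', 'b', 'c'].foldl
          (fun acc new_c =>
            if some new_c ≠ PySem.List.pyGet? color (-1) then acc ++ [color ++ [new_c]]
            else acc)
          new_colorings)
      [] = pvStep colorings := by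
  have key : ∀ (l : List (List Char)) (init : List (List Char)),
      l.foldl
        (fun new_colorings color =>
          ['a', 'b', 'c'].foldl
            (fun acc new_c =>
              if some new_c ≠ PySem.List.pyGet? color (-1) then acc ++ [color ++ [new_c]]
              else acc)
            new_colorings)
        init = init ++ pvStep l := by
    intro l
    induction l with
    | nil => simp [pvStep]
    | cons color rest ih =>
      intro init
      rw [List.foldl_cons, ih]
      simp only [pvStep, List.flatMap_cons, List.foldl_cons, List.foldl_nil, List.filter]
      by_cases h1 : some 'a' ≠ PySem.List.pyGet? color (-1) <;>
        by_cases h2 : some 'b' ≠ PySem.List.pyGet? color (-1) <;>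
          by_cases h3 : some 'c' ≠ PySem.List.pyGet? color (-1) <;>
            simp [h1, h2, h3]
  simpa using key colorings []

-- B's depth-first extension of `cur` equals n = (m - |cur|).toNat BFS levels on [cur]
theorem pvExtend_eq_iter (m : Int) :
    ∀ (n : Nat) (cur : List Char), (m - cur.length).toNat = n →
      pvExtend m cur = pvStep^[n] [cur] := by
  intro n
  induction n with
  | zero =>
    intro cur hn
    have hle : m ≤ (cur.length : Int) := by omega
    rw [pvExtend]
    simp [hle]
  | succ n ih =>
    intro cur hn
    have hlt : ¬ m ≤ (cur.length : Int) := by omega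
    rw [pvExtend]
    simp only [hlt, dite_false]
    have hchild : ∀ c : Char, (m - (cur ++ [c]).length : Int).toNat = n := by
      intro c; simp only [List.length_append, List.length_cons, List.length_nil]; omega
    rw [Function.iterate_succ_apply]
    have hstep : pvStep [cur] =
        (['a', 'b', 'c'].filter (fun c => some c ≠ PySem.List.pyGet? cur (-1))).map
          (fun c => cur ++ [c]) := by
      simp [pvStep]
    rw [hstep, pvStep_iter_flat]
    simp only [List.foldl, List.filter]
    by_cases h1 : some 'a' ≠ PySem.List.pyGet? cur (-1) <;>
      by_cases h2 : some 'b' ≠ PySem.List.pyGet? cur (-1) <;>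
        by_cases h3 : some 'c' ≠ PySem.List.pyGet? cur (-1) <;>
          simp [h1, h2, h3, ih _ (hchild _)]

theorem pvFoldl_const_iter {α β : Type} (g : α → α) (l : List β) (init : α) :
    l.foldl (fun s _ => g s) init = g^[l.length] init := by
  induction l generalizing init with
  | nil => rfl
  | cons x xs ih => simp [List.foldl_cons, ih, Function.iterate_succ_apply]

-- ===== VERDICT (by name: the statement is the Claim_ definition above) =====
theorem get_column_colorings_spec : Claim_equal_get_column_colorings := by
  intro m _
  unfold Spec_get_column_colorings get_column_colorings get_column_colorings_alt
  simp only []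
  have houter :
      (PySem.List.pyRange 0 (m - 1) 1).foldl
        (fun colorings _ =>
          colorings.foldl
            (fun new_colorings color =>
              ['a', 'b', 'c'].foldl
                (fun acc new_c =>
                  if some new_c ≠ PySem.List.pyGet? color (-1) then acc ++ [color ++ [new_c]]
                  else acc)
                new_colorings)
            [])
        [['a'], ['b'], ['c']]
      = pvStep^[(m - 1).toNat] [['a'], ['b'], ['c']] := by
    have hfun : (fun (colorings : List (List Char)) (_ : Int) =>
        colorings.foldl
          (fun new_colorings color =>
            ['a', 'b', 'c'].foldl
              (fun acc new_c =>
                if some new_c ≠ PySem.List.pyGet? color (-1) then acc ++ [color ++ [new_c]]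
                else acc)
              new_colorings)
          []) = fun colorings _ => pvStep colorings := by
      funext colorings _
      exact pvInner_eq_step colorings
    rw [hfun, pvFoldl_const_iter]
    rw [PySem.List.length_pyRange_one]
    norm_num
  rw [houter]
  have hsplit : pvStep^[(m - 1).toNat] [['a'], ['b'], ['c']]
      = pvStep^[(m - 1).toNat] [['a']] ++ pvStep^[(m - 1).toNat] [['b']]
        ++ pvStep^[(m - 1).toNat] [['c']] := by
    rw [pvStep_iter_flat]
    simp
  rw [hsplit]
  have h1 : ∀ c : Char, pvExtend m [c] = pvStep^[(m - 1).toNat] [[c]] := by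
    intro c
    exact pvExtend_eq_iter m (m - 1).toNat [c] (by simp)
  rw [h1 'a', h1 'b', h1 'c']
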